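-- pv_equiv track=rewrite | github.com/rstreets96/AdventOfCode2022 | ArrangeCrates(Day5).py | parsingMoves
-- ===== SOURCE A (Python) =====
-- def parsingMoves(data):
--     output = []
--     startMoves = False
--     for line in data:
--         if(not startMoves):
--             if(line == ''):
--                 startMoves = True
--             else:
--                 continue
--         else:
--             output.append(line.split(' '))
--     return output
-- ===== SOURCE B (Python) =====
-- def parsingMoves(data):
--     try:
--         idx = data.index('')
--     except ValueError:
--         return []
--     return [line.split(' ') for line in data[idx + 1:]]
-- ===== Notes on version B (the rewrite author's own statement) =====
-- stated objective: simpler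
-- what changed: Replaces the flag-threaded accumulating loop with a locate-then-transform decomposition: find the first blank line's index, then map split over the tail after it.
import Mathlib
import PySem

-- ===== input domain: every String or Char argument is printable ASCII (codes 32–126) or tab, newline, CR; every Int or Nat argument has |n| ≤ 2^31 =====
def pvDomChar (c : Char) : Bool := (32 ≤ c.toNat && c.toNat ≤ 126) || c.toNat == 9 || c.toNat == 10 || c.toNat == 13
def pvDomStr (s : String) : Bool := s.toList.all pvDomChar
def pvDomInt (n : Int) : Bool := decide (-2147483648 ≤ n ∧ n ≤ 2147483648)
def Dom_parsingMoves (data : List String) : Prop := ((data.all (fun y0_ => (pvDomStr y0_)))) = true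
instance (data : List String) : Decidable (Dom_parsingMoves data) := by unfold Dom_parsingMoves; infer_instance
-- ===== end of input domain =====

-- B replaces A's flag-threaded accumulating loop by locate-the-first-blank-line, then map split over the tail (simpler decomposition; same cost).


-- ===== PORT A =====
-- line.split(' ')  (sep " " is nonempty, so split? is always some)
def pvSplitSpace (line : String) : List String := (PySem.Str.split? line " ").getD []

-- A's for-loop over data with state (output, startMoves), step for step
def parsingMovesGo (output : List (List String)) (startMoves : Bool) : List String → List (List String)
  | [] => output
  | line :: rest =>
    if startMoves = false then
      if line = "" then parsingMovesGo output true rest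
      else parsingMovesGo output false rest
    else parsingMovesGo (output ++ [pvSplitSpace line]) startMoves rest

def parsingMoves (data : List String) : List (List String) :=
  parsingMovesGo [] false data

-- ===== PORT B =====
def parsingMoves_alt (data : List String) : List (List String) :=
  match PySem.List.index? data "" with
  | none => []
  | some i => (PySem.List.slice data (some ((i : Int) + 1)) none).map pvSplitSpace

-- ===== PRECONDITION & SPEC =====
def Spec_parsingMoves (data : List String) (out : List (List String)) : Prop := out = parsingMoves_alt data
instance (data : List String) (out : List (List String)) : Decidable (Spec_parsingMoves data out) := by unfold Spec_parsingMoves; infer_instance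

-- ===== CLAIM (what is proved, stated in full; the proofs are below) =====
def Claim_equal_parsingMoves : Prop := ∀ (data : List String), Dom_parsingMoves data → Spec_parsingMoves data (parsingMoves data)

-- ===== LEMMAS AND PROOFS =====
theorem parsingMovesGo_true (output : List (List String)) (rest : List String) :
    parsingMovesGo output true rest = output ++ rest.map pvSplitSpace := by
  induction rest generalizing output with
  | nil => simp [parsingMovesGo]
  | cons x xs ih => simp [parsingMovesGo, ih]

theorem parsingMoves_eq_alt (data : List String) :
    parsingMoves data = parsingMoves_alt data := by
  unfold parsingMoves
  induction data with
  | nil => simp [parsingMovesGo, parsingMoves_alt, PySem.List.index?]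
  | cons x xs ih =>
    by_cases hx : x = ""
    · subst hx
      rw [show parsingMovesGo [] false ("" :: xs) = xs.map pvSplitSpace by
        simp [parsingMovesGo, parsingMovesGo_true]]
      unfold parsingMoves_alt
      rw [PySem.List.index?_cons_self]
      show List.map pvSplitSpace xs =
        List.map pvSplitSpace (PySem.List.slice ("" :: xs) (some (((0 : Nat) : Int) + 1)))
      rw [show ((0 : Nat) : Int) + 1 = ((1 : Nat) : Int) by norm_num,
        PySem.List.slice_from_natCast]
      simp
    · rw [show parsingMovesGo [] false (x :: xs) = parsingMovesGo [] false xs by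
        simp [parsingMovesGo, hx]]
      rw [ih]
      unfold parsingMoves_alt
      rw [PySem.List.index?_cons_of_ne xs hx]
      cases h : PySem.List.index? xs "" with
      | none => simp
      | some i =>
        simp only [Option.map_some]
        show List.map pvSplitSpace (PySem.List.slice xs (some ((i : Int) + 1))) =
          List.map pvSplitSpace (PySem.List.slice (x :: xs) (some (((i + 1 : Nat) : Int) + 1)))
        rw [show ((i + 1 : Nat) : Int) + 1 = ((i + 2 : Nat) : Int) by push_cast; ring,
          PySem.List.slice_from_natCast,
          show ((i : Nat) : Int) + 1 = ((i + 1 : Nat) : Int) by push_cast; ring,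
          PySem.List.slice_from_natCast]
        simp

-- ===== VERDICT (by name: the statement is the Claim_ definition above) =====
theorem parsingMoves_spec : Claim_equal_parsingMoves := by
  intro data _
  exact parsingMoves_eq_alt data
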